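-- pv_equiv track=rewrite | github.com/casperbroch/strategic_voting | btva_exp_main.py | voting_scheme
-- ===== SOURCE A (Python) =====
-- def voting_scheme(preferences):
--     vote_count = {}
--     for pref in preferences:
--         top = pref[0]
--         vote_count[top] = vote_count.get(top, 0) + 1
--     max_votes = max(vote_count.values())
--     winners = [cand for cand, count in vote_count.items() if count == max_votes]
--     winners.sort()
--     return winners[0]
-- ===== SOURCE B (Python) =====
-- def voting_scheme(preferences):
--     # sort all first choices, then find the longest run in one scan;
--     # the first longest run belongs to the smallest tied candidate
--     tops = sorted(pref[0] for pref in preferences)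
--     best = None
--     best_count = 0
--     run = 0
--     prev = None
--     for t in tops:
--         if t == prev:
--             run += 1
--         else:
--             run = 1
--             prev = t
--         if run > best_count:
--             best_count = run
--             best = t
--     return best
-- ===== Notes on version B (the rewrite author's own statement) =====
-- stated objective: alternative
-- what changed: Instead of a dict tally followed by max/filter/sort/index, B sorts the list of first choices and finds the plurality winner as the first longest run in a single scan (no dictionary at all); ascending order makes the first maximal run the lexicographically smallest tied candidate.
import Mathlib
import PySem

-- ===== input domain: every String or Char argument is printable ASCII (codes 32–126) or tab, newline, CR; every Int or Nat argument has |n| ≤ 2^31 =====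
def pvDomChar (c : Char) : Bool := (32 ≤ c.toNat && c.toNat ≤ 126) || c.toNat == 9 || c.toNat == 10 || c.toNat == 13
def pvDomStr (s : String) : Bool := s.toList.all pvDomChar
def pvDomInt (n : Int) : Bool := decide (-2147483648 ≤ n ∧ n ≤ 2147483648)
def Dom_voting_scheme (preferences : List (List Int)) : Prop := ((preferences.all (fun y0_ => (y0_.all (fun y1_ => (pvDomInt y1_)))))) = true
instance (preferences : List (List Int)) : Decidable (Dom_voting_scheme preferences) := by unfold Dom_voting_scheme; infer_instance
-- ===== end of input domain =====

-- B sorts the list of first choices and picks the first longest run in one scan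
-- (no dictionary), instead of A's dict tally + max/filter/sort/index (objective: alternative).


-- ===== PORT A =====
def voting_scheme (preferences : List (List Int)) : Int :=
  let vote_count := preferences.foldl
    (fun d pref =>
      let top := (PySem.List.pyGet? pref 0).getD 0   -- pref[0]; Pre_ excludes empty ballots
      d.insert top (d.getD top 0 + 1)) (PySem.Dict.empty : PySem.Dict Int Int)
  let max_votes := (PySem.List.max? vote_count.values (fun v => v)).getD 0  -- max(...); Pre_ excludes []
  let winners := (vote_count.items.filter (fun p => p.2 == max_votes)).map (fun p => p.1)
  let winners' := PySem.List.sorted winners (fun x => x) false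
  (PySem.List.pyGet? winners' 0).getD 0   -- winners[0]; nonempty under Pre_

-- ===== PORT B =====
-- the loop body of Source B: state (best, best_count, run, prev)
def bstep (st : Option Int × Int × Int × Option Int) (t : Int) :
    Option Int × Int × Int × Option Int :=
  match st with
  | (best, bc, run, prev) =>
    let (run', prev') := if some t == prev then (run + 1, prev) else (1, some t)
    if run' > bc then (some t, run', run', prev') else (best, bc, run', prev')

def voting_scheme_alt (preferences : List (List Int)) : Int :=
  let tops := PySem.List.sorted
    (preferences.map (fun pref => (PySem.List.pyGet? pref 0).getD 0))  -- pref[0]; Pre_ excludes empty ballots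
    (fun x => x) false
  let final := tops.foldl bstep ((none, 0, 0, none) : Option Int × Int × Int × Option Int)
  final.1.getD 0   -- best; some _ under Pre_ (nonempty input)

-- ===== PRECONDITION & SPEC =====
-- Pre_ excludes exactly the inputs where A raises: an empty preference list (ValueError
-- from max of an empty sequence) and any voter with an empty ballot (IndexError on pref[0]).
def Pre_voting_scheme (preferences : List (List Int)) : Prop :=
  preferences ≠ [] ∧ ∀ p ∈ preferences, p ≠ []
instance (preferences : List (List Int)) : Decidable (Pre_voting_scheme preferences) := by unfold Pre_voting_scheme; infer_instance
def pvWitness_voting_scheme : List (List Int) := [[1, 2], [2], [1, 3]]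

def Spec_voting_scheme (preferences : List (List Int)) (out : Int) : Prop := out = voting_scheme_alt preferences
instance (preferences : List (List Int)) (out : Int) : Decidable (Spec_voting_scheme preferences out) := by unfold Spec_voting_scheme; infer_instance

-- ===== CLAIM (what is proved, stated in full; the proofs are below) =====
def Claim_equal_voting_scheme : Prop := ∀ (preferences : List (List Int)), Dom_voting_scheme preferences → Pre_voting_scheme preferences → Spec_voting_scheme preferences (voting_scheme preferences)

-- ===== LEMMAS AND PROOFS =====

-- the common characterisation: b has strictly more first-place votes than every other
-- candidate, or as many with b the smaller candidate
def IsWinner (L : List Int) (b : Int) : Prop :=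
  b ∈ L ∧ ∀ y ∈ L, L.count y < L.count b ∨ (L.count y = L.count b ∧ b ≤ y)

lemma isWinner_unique {L : List Int} {b₁ b₂ : Int}
    (h₁ : IsWinner L b₁) (h₂ : IsWinner L b₂) : b₁ = b₂ := by
  obtain ⟨hm₁, hP₁⟩ := h₁
  obtain ⟨hm₂, hP₂⟩ := h₂
  have a₁ := hP₁ b₂ hm₂
  have a₂ := hP₂ b₁ hm₁
  omega

lemma isWinner_perm {L₁ L₂ : List Int} {b : Int} (h : L₁.Perm L₂)
    (hw : IsWinner L₁ b) : IsWinner L₂ b := by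
  obtain ⟨hm, hP⟩ := hw
  refine ⟨h.mem_iff.mp hm, fun y hy => ?_⟩
  rw [← h.count_eq, ← h.count_eq]
  exact hP y (h.mem_iff.mpr hy)

-- head of an ascending sort is a lower bound of the original list
lemma sorted_head_min (W : List Int) (s0 : Int) (rest : List Int)
    (hS : PySem.List.sorted W (fun x => x) false = s0 :: rest) :
    s0 ∈ W ∧ ∀ w ∈ W, s0 ≤ w := by
  have hperm := PySem.List.sorted_perm W (fun x => x) false
  rw [hS] at hperm
  constructor
  · exact hperm.mem_iff.mp (by simp)
  · intro w hw
    have hw' : w ∈ s0 :: rest := hperm.mem_iff.mpr hw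
    obtain ⟨q, hq, hget⟩ := List.mem_iff_getElem.mp hw'
    have hq' : q < (PySem.List.sorted W (fun x => x) false).length := by rw [hS]; exact hq
    have := PySem.List.sorted_id_getElem_mono W (Nat.zero_le q) hq'
    simp only [hS] at this
    simpa [hget] using this

-- A's result is the winner (in the IsWinner sense) of the list of first choices
lemma A_isWinner (preferences : List (List Int)) (hne : preferences ≠ []) :
    IsWinner (preferences.map (fun pref => (PySem.List.pyGet? pref 0).getD 0))
      (voting_scheme preferences) := by
  unfold voting_scheme
  have hvc : preferences.foldl
      (fun d pref =>
        d.insert ((PySem.List.pyGet? pref 0).getD 0)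
          (d.getD ((PySem.List.pyGet? pref 0).getD 0) 0 + 1)) PySem.Dict.empty
      = PySem.Dict.counter (preferences.map (fun pref => (PySem.List.pyGet? pref 0).getD 0)) := by
    rw [← PySem.Dict.foldl_insert_getD_add_one_eq_counter, List.foldl_map]
  simp only [hvc]
  set tops : List Int := preferences.map (fun pref => (PySem.List.pyGet? pref 0).getD 0)
    with htops
  set vc := PySem.Dict.counter tops with hvcdef
  set g : Int → Int := fun c => ((tops.count c : Nat) : Int) with hg
  have hkeys : vc.keys = PySem.Set.ofList tops := PySem.Dict.keys_counter tops
  have hitems : vc.items = vc.keys.map (fun k => (k, g k)) := by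
    rw [hkeys, PySem.Dict.items_counter]
  have hnodup : vc.keys.Nodup := PySem.Dict.nodup_keys_counter tops
  have hgetD : ∀ c, vc.getD c 0 = g c := fun c => PySem.Dict.getD_counter tops c
  have hvals : vc.values = vc.keys.map g := by
    rw [PySem.Dict.values_eq_map_keys vc hnodup 0]
    exact List.map_congr_left (fun k _ => hgetD k)
  obtain ⟨p, ps, rfl⟩ := List.exists_cons_of_ne_nil hne
  have hmemtop : (PySem.List.pyGet? p 0).getD 0 ∈ tops := by rw [htops]; simp
  have hkmem : (PySem.List.pyGet? p 0).getD 0 ∈ vc.keys := by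
    rw [hkeys]; exact (PySem.Set.mem_ofList _ _).mpr hmemtop
  have hvalsne : vc.values ≠ [] := by
    rw [hvals]
    exact fun h => List.ne_nil_of_mem hkmem (List.map_eq_nil_iff.mp h)
  obtain ⟨M, hM⟩ : ∃ M, PySem.List.max? vc.values (fun v => v) = some M := by
    cases hM : PySem.List.max? vc.values (fun v => v) with
    | none => exact absurd (Iff.mp (PySem.List.max?_eq_none_iff vc.values (fun v => v)) hM) hvalsne
    | some M => exact ⟨M, rfl⟩
  have hMmax : ∀ k ∈ vc.keys, g k ≤ M := by
    intro k hk
    have : g k ∈ vc.values := by rw [hvals]; exact List.mem_map_of_mem hk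
    simpa using PySem.List.max?_isMax hM _ this
  simp only [hM, Option.getD_some, hitems]
  have hwin : ((vc.keys.map (fun k => (k, g k))).filter (fun q => q.2 == M)).map (fun q => q.1)
      = vc.keys.filter (fun k => g k == M) := by
    rw [List.filter_map, List.map_map]
    simp [Function.comp_def]
  rw [hwin]
  set W := vc.keys.filter (fun k => g k == M) with hW
  obtain ⟨s0, rest, hS⟩ : ∃ s0 rest, PySem.List.sorted W (fun x => x) false = s0 :: rest := by
    have hMmem : M ∈ vc.values := PySem.List.max?_mem hM
    rw [hvals] at hMmem
    obtain ⟨k0, hk0mem, hk0⟩ := List.mem_map.mp hMmem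
    have hk0W : k0 ∈ W := by rw [hW]; exact List.mem_filter.mpr ⟨hk0mem, by simp [hk0]⟩
    cases hS : PySem.List.sorted W (fun x => x) false with
    | nil => exact absurd (Iff.mp (PySem.List.sorted_eq_nil_iff W (fun x => x) false) hS ▸ hk0W) (List.not_mem_nil)
    | cons s0 rest => exact ⟨s0, rest, rfl⟩
  obtain ⟨hs0W, hs0min⟩ := sorted_head_min W s0 rest hS
  have hhead : (PySem.List.pyGet? (s0 :: rest) (0 : Int)).getD 0 = s0 := by simp
  rw [hS, hhead]
  have hs0keys : s0 ∈ vc.keys := (List.mem_filter.mp hs0W).1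
  have hs0g : g s0 = M := by
    have := (List.mem_filter.mp hs0W).2; simpa using this
  constructor
  · rw [htops] at hkeys ⊢
    exact (PySem.Set.mem_ofList _ _).mp (hkeys ▸ hs0keys)
  · intro y hy
    have hykeys : y ∈ vc.keys := by
      rw [hkeys]; exact (PySem.Set.mem_ofList _ _).mpr hy
    have hy_le : g y ≤ M := hMmax y hykeys
    by_cases hyM : g y = M
    · right
      constructor
      · have : g y = g s0 := by rw [hyM, hs0g]
        simpa [hg] using this
      · exact hs0min y (List.mem_filter.mpr ⟨hykeys, by simp [hyM]⟩)
    · left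
      have : g y < g s0 := by rw [hs0g]; omega
      simpa [hg] using this

-- the scan invariant for B's fold over the (sorted) remaining suffix
lemma scan_inv : ∀ (rest done : List Int) (b p : Int),
    p ∈ done → (∀ y ∈ done, y ≤ p) →
    b ∈ done → b ≤ p →
    (∀ y ∈ done, done.count y < done.count b ∨ (done.count y = done.count b ∧ b ≤ y)) →
    List.Pairwise (· ≤ ·) rest → (∀ t ∈ rest, p ≤ t) →
    ∃ b', (rest.foldl bstep
        (some b, (done.count b : Int), (done.count p : Int), some p)).1 = some b' ∧
      IsWinner (done ++ rest) b' := by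
  intro rest
  induction rest with
  | nil =>
    intro done b p hp hall hb hbp hP _ _
    exact ⟨b, rfl, by simpa [IsWinner] using ⟨hb, hP⟩⟩
  | cons t rest ih =>
    intro done b p hp hall hb hbp hP hsr hcross
    have hpt : p ≤ t := hcross t (by simp)
    have hsr' : List.Pairwise (· ≤ ·) rest := hsr.tail
    have hct : (done ++ [t]).count t = done.count t + 1 := by simp
    have hcy : ∀ y : Int, y ≠ t → (done ++ [t]).count y = done.count y := by
      intro y h; simp [List.count_append, Ne.symm h]
    have hassoc : (done ++ [t]) ++ rest = done ++ t :: rest := by simp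
    have hcross' : ∀ u ∈ rest, t ≤ u := fun u hu => List.rel_of_pairwise_cons hsr hu
    have h1 : (((done ++ [t]).count t : Nat) : Int) = (done.count t : Int) + 1 := by
      rw [hct]; push_cast; ring
    rw [List.foldl_cons]
    by_cases ht : t = p
    · -- same candidate as previous: the run extends
      rw [← ht] at hp hall hbp ⊢
      have hstep : bstep (some b, (done.count b : Int), (done.count t : Int), some t) t
          = if ((done.count t : Int) + 1 > (done.count b : Int))
            then (some t, (done.count t : Int) + 1, (done.count t : Int) + 1, some t)
            else (some b, (done.count b : Int), (done.count t : Int) + 1, some t) := by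
        simp [bstep]
      rw [hstep]
      by_cases hgt : ((done.count t : Int) + 1 > (done.count b : Int))
      · rw [if_pos hgt]
        obtain ⟨b', hfold, hwin⟩ := ih (done ++ [t]) t t (by simp)
          (by intro y hy
              rcases List.mem_append.mp hy with h | h
              · exact hall y h
              · simp at h; omega)
          (by simp) le_rfl
          (by intro y hy
              by_cases hyt : y = t
              · rw [hyt]; right; exact ⟨rfl, le_rfl⟩
              · have hyd : y ∈ done := by
                  rcases List.mem_append.mp hy with h | h
                  · exact h
                  · simp at h; exact absurd h hyt
                left
                rw [hcy y hyt, hct]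
                have := hP y hyd
                omega)
          hsr' hcross'
        rw [h1] at hfold
        exact ⟨b', hfold, hassoc ▸ hwin⟩
      · rw [if_neg hgt]
        have hbt : b ≠ t := fun h => hgt (by rw [h]; omega)
        have h2 : (((done ++ [t]).count b : Nat) : Int) = (done.count b : Int) := by
          rw [hcy b hbt]
        obtain ⟨b', hfold, hwin⟩ := ih (done ++ [t]) b t (by simp)
          (by intro y hy
              rcases List.mem_append.mp hy with h | h
              · exact hall y h
              · simp at h; omega)
          (by simp [hb]) hbp
          (by intro y hy
              by_cases hyt : y = t
              · rw [hyt, hct, hcy b hbt]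
                rcases Nat.lt_or_ge (done.count t + 1) (done.count b) with h | h
                · left; exact h
                · right; exact ⟨by omega, hbp⟩
              · have hyd : y ∈ done := by
                  rcases List.mem_append.mp hy with h | h
                  · exact h
                  · simp at h; exact absurd h hyt
                rw [hcy y hyt, hcy b hbt]
                exact hP y hyd)
          hsr' hcross'
        rw [h2, h1] at hfold
        exact ⟨b', hfold, hassoc ▸ hwin⟩
    · -- a new, strictly larger candidate: the run restarts at 1
      have hpt' : p < t := lt_of_le_of_ne hpt (fun h => ht h.symm)
      have hbpos : 0 < done.count b := List.count_pos_iff.mpr hb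
      have hstep : bstep (some b, (done.count b : Int), (done.count p : Int), some p) t
          = if ((1 : Int) > (done.count b : Int))
            then (some t, 1, 1, some t)
            else (some b, (done.count b : Int), 1, some t) := by
        have hbeq : (some t == some p) = false := by simp [ht]
        simp [bstep, hbeq]
      rw [hstep, if_neg (by omega)]
      have hct0 : done.count t = 0 :=
        List.count_eq_zero.mpr (fun hmem => by have := hall t hmem; omega)
      have hbt : b ≠ t := fun h => by rw [h] at hbp; omega
      have h2 : (((done ++ [t]).count b : Nat) : Int) = (done.count b : Int) := by
        rw [hcy b hbt]
      have h1' : (((done ++ [t]).count t : Nat) : Int) = 1 := by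
        rw [hct, hct0]; simp
      obtain ⟨b', hfold, hwin⟩ := ih (done ++ [t]) b t (by simp)
        (by intro y hy
            rcases List.mem_append.mp hy with h | h
            · have := hall y h; omega
            · simp at h; omega)
        (by simp [hb]) (by omega)
        (by intro y hy
            by_cases hyt : y = t
            · rw [hyt, hct, hct0, hcy b hbt]
              rcases Nat.lt_or_ge 1 (done.count b) with h | h
              · left; omega
              · right; exact ⟨by omega, by omega⟩
            · have hyd : y ∈ done := by
                rcases List.mem_append.mp hy with h | h
                · exact h
                · simp at h; exact absurd h hyt
              rw [hcy y hyt, hcy b hbt]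
              exact hP y hyd)
        hsr' hcross'
      rw [h2, h1'] at hfold
      exact ⟨b', hfold, hassoc ▸ hwin⟩

-- B's result is the winner of the list of first choices
lemma B_isWinner (preferences : List (List Int)) (hne : preferences ≠ []) :
    IsWinner (preferences.map (fun pref => (PySem.List.pyGet? pref 0).getD 0))
      (voting_scheme_alt preferences) := by
  unfold voting_scheme_alt
  set tops : List Int := preferences.map (fun pref => (PySem.List.pyGet? pref 0).getD 0)
    with htops
  set tops' := PySem.List.sorted tops (fun x => x) false with htops'
  have hperm : tops'.Perm tops := PySem.List.sorted_perm tops (fun x => x) false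
  show IsWinner tops
    ((tops'.foldl bstep ((none, 0, 0, none) : Option Int × Int × Int × Option Int)).1.getD 0)
  have htne : tops ≠ [] := by
    rw [htops]
    exact fun h => hne (List.map_eq_nil_iff.mp h)
  obtain ⟨x, xs, hX⟩ : ∃ x xs, tops' = x :: xs := by
    cases hX : tops' with
    | nil =>
      rw [htops'] at hX
      exact absurd (Iff.mp (PySem.List.sorted_eq_nil_iff tops (fun x => x) false) hX) htne
    | cons x xs => exact ⟨x, xs, rfl⟩
  have hpw : List.Pairwise (· ≤ ·) tops' := by
    have := PySem.List.sorted_pairwise tops (fun x => x)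
    simpa [htops'] using this
  rw [hX] at hpw
  have hfirst : bstep ((none, 0, 0, none) : Option Int × Int × Int × Option Int) x
      = (some x, 1, 1, some x) := by
    simp [bstep]
  have hcx : (([x] : List Int).count x : Int) = 1 := by simp
  obtain ⟨b', hfold, hwin⟩ := scan_inv xs [x] x x (by simp) (by simp) (by simp) (le_refl x)
    (by intro y hy; simp at hy; subst hy; right; simp)
    hpw.tail (fun u hu => List.rel_of_pairwise_cons hpw hu)
  rw [hcx] at hfold
  have : (tops'.foldl bstep ((none, 0, 0, none) : Option Int × Int × Int × Option Int)).1
      = some b' := by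
    rw [hX, List.foldl_cons, hfirst]
    exact hfold
  rw [this]
  simp only [Option.getD_some]
  have hwin' : IsWinner tops' b' := by
    rw [hX]; simpa using hwin
  exact isWinner_perm hperm hwin'

-- ===== VERDICT =====
theorem voting_scheme_spec : Claim_equal_voting_scheme := by
  intro preferences _ hpre
  unfold Spec_voting_scheme
  exact isWinner_unique (A_isWinner preferences hpre.1) (B_isWinner preferences hpre.1)
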